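-- pv_equiv track=rewrite | github.com/LIDD-UP/try_different_way | buildingTypeId_no_reducing_demensions/first_process/kaggle_dnn.py | histogram_for_non_numerical_series
-- ===== SOURCE A (Python) =====
-- def histogram_for_non_numerical_series(s):
--     d = {}
--     for v in s:
--         d[v] = d.get(v, 0) + 1
--     bin_s_label = list(d.keys())
--     bin_s_label.sort()
--     bin_s = list(range(0, len(bin_s_label)))
--     hist_s = [d[v] for v in bin_s_label]
--     bin_s.append(len(bin_s))
--     bin_s_label.insert(0, '_')
--     return (hist_s, bin_s, bin_s_label)
-- ===== SOURCE B (Python) =====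
-- def histogram_for_non_numerical_series(s):
--     # sort-then-group: count runs of equal consecutive elements; no frequency dict
--     runs = []  # list of [value, count], in sorted order
--     for v in sorted(s):
--         if runs and runs[-1][0] == v:
--             runs[-1][1] += 1
--         else:
--             runs.append([v, 1])
--     hist_s = [c for _, c in runs]
--     bin_s = list(range(len(runs) + 1))
--     bin_s_label = ['_'] + [v for v, _ in runs]
--     return (hist_s, bin_s, bin_s_label)
-- ===== Notes on version B (the rewrite author's own statement) =====
-- stated objective: alternative
-- what changed: Replaces the hash-count-then-sort-keys strategy with sort-the-whole-series-then-count-runs-of-equal-consecutive-elements (groupby-style), so no frequency dict is maintained.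
import Mathlib
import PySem

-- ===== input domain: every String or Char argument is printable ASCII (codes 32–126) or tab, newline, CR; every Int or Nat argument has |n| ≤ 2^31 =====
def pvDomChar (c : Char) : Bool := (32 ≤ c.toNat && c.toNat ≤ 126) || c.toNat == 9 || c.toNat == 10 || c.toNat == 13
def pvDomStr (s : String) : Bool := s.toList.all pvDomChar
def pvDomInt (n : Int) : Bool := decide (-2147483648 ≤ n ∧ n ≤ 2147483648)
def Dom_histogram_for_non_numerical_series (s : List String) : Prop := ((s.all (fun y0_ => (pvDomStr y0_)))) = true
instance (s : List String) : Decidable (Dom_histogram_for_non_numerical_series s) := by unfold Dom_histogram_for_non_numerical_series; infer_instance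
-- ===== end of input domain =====

-- B replaces A's dict-count-then-sort-keys with sort-then-count-runs-of-equal-consecutive-elements (no frequency dict); alternative decomposition, same outputs.


-- ===== PORT A =====
-- d[v] in the comprehension always succeeds (v ∈ d.keys), so it is ported as getD d v 0 (exact there)
def histogram_for_non_numerical_series (s : List String) : List Int × List Int × List String :=
  let d := s.foldl (fun d v => PySem.Dict.insert d v (PySem.Dict.getD d v 0 + 1)) PySem.Dict.empty
  let bin_s_label := PySem.List.sorted (PySem.Dict.keys d) (fun x => x) false
  let bin_s := PySem.List.pyRange 0 (bin_s_label.length : Int) 1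
  let hist_s := bin_s_label.map (fun v => PySem.Dict.getD d v 0)
  let bin_s2 := bin_s ++ [(bin_s.length : Int)]
  let bin_s_label2 := "_" :: bin_s_label
  (hist_s, bin_s2, bin_s_label2)

-- ===== PORT B =====
-- runs as a reversed accumulator: the head of `acc` is Python's runs[-1] (the last run)
def hfnStep (acc : List (String × Int)) (v : String) : List (String × Int) :=
  match acc with
  | (u, c) :: rest => if u == v then (u, c + 1) :: rest else (v, 1) :: (u, c) :: rest
  | [] => [(v, 1)]

def histogram_for_non_numerical_series_alt (s : List String) : List Int × List Int × List String :=
  let runs := ((PySem.List.sorted s (fun x => x) false).foldl hfnStep []).reverse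
  let hist_s := runs.map (fun p => p.2)
  let bin_s := PySem.List.pyRange 0 ((runs.length : Int) + 1) 1
  let bin_s_label := "_" :: runs.map (fun p => p.1)
  (hist_s, bin_s, bin_s_label)

-- ===== PRECONDITION & SPEC =====
def Spec_histogram_for_non_numerical_series (s : List String) (out : List Int × List Int × List String) : Prop := out = histogram_for_non_numerical_series_alt s
instance (s : List String) (out : List Int × List Int × List String) : Decidable (Spec_histogram_for_non_numerical_series s out) := by unfold Spec_histogram_for_non_numerical_series; infer_instance

-- ===== CLAIM (what is proved, stated in full; the proofs are below) =====
def Claim_equal_histogram_for_non_numerical_series : Prop := ∀ (s : List String), Dom_histogram_for_non_numerical_series s → Spec_histogram_for_non_numerical_series s (histogram_for_non_numerical_series s)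

-- ===== LEMMAS AND PROOFS =====

-- runsAux u c t : finish the run (u, c) against the remaining list t (front recursion)
def runsAux (u : String) (c : Int) : List String → List (String × Int)
  | [] => [(u, c)]
  | v :: t => if u == v then runsAux u (c + 1) t else (u, c) :: runsAux v 1 t

def runsOf : List String → List (String × Int)
  | [] => []
  | v :: t => runsAux v 1 t

theorem foldl_hfnStep_eq (t : List String) : ∀ (u : String) (c : Int) (rest : List (String × Int)),
    t.foldl hfnStep ((u, c) :: rest) = (runsAux u c t).reverse ++ rest := by
  induction t with
  | nil => intro u c rest; simp [runsAux]
  | cons v t ih =>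
    intro u c rest
    by_cases h : u = v
    · simp [hfnStep, runsAux, h, ih]
    · simp only [List.foldl_cons, hfnStep, beq_iff_eq, if_neg h, runsAux, ih]
      simp

theorem foldl_hfnStep_nil (t : List String) : (t.foldl hfnStep []).reverse = runsOf t := by
  cases t with
  | nil => simp [runsOf]
  | cons v t => simp [hfnStep, runsOf, foldl_hfnStep_eq]

theorem dedup_cons (v : String) (t : List String) :
    PySem.List.dedup (v :: t) = v :: PySem.List.dedup (t.filter (fun w => !(v == w))) := by
  -- main auxiliary: pushing through a cons accumulator
  have aux : ∀ (t : List String) (v : String) (acc : List String),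
      t.foldl PySem.Set.add (v :: acc) = v :: (t.filter (fun w => !(v == w))).foldl PySem.Set.add acc := by
    intro t
    induction t with
    | nil => intro v acc; simp
    | cons w t ih =>
      intro v acc
      by_cases h : v = w
      · simp [PySem.Set.add, PySem.Set.contains, h, ih]
      · have hadd : PySem.Set.add (v :: acc) w = v :: PySem.Set.add acc w := by
          by_cases hw : w ∈ acc <;>
            simp [PySem.Set.add, PySem.Set.contains, hw, Ne.symm h]
        simp only [List.foldl_cons, hadd, List.filter_cons]
        simp [h, ih]
  have h0 : PySem.List.dedup (v :: t) = t.foldl PySem.Set.add [v] := by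
    simp [PySem.List.dedup_eq_ofList, PySem.Set.ofList_eq_foldl, PySem.Set.add, PySem.Set.contains]
  rw [h0, aux t v []]
  simp [PySem.List.dedup_eq_ofList, PySem.Set.ofList_eq_foldl]

theorem runsAux_spec (t : List String) : ∀ (u : String) (c : Int),
    (∀ w ∈ t, u ≤ w) → t.Pairwise (· ≤ ·) →
    runsAux u c t = (u, c + (t.count u : Int)) :: runsOf (t.filter (fun w => !(u == w))) := by
  induction t with
  | nil => intro u c _ _; simp [runsAux, runsOf]
  | cons w t ih =>
    intro u c hle hp
    by_cases h : u = w
    · subst h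
      have hle' : ∀ x ∈ t, u ≤ x := fun x hx => (List.pairwise_cons.mp hp).1 x hx
      have hp' : t.Pairwise (· ≤ ·) := (List.pairwise_cons.mp hp).2
      have harith : (c + 1) + (t.count u : Int) = c + (((u :: t).count u : Nat) : Int) := by
        simp [List.count_cons_self]; ring
      simp only [runsAux, beq_self_eq_true, if_true, ih u (c + 1) hle' hp', List.filter_cons]
      simp [harith]
    · have hcnt : t.count u = 0 := by
        rw [List.count_eq_zero]
        intro hu
        have h1 : u ≤ w := hle w (by simp)
        have h2 : w ≤ u := (List.pairwise_cons.mp hp).1 u hu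
        exact h (le_antisymm h1 h2)
      have hnotu : ∀ x ∈ t, ¬ (u = x) := by
        intro x hx he; subst he
        exact (by simpa [hcnt] using (List.count_pos_iff.mpr hx : 0 < t.count u))
      have hfilt : t.filter (fun x => !(u == x)) = t :=
        List.filter_eq_self.mpr (fun x hx => by simp [hnotu x hx])
      simp only [runsAux, beq_iff_eq, if_neg h, List.count_cons, List.filter_cons]
      simp [h, Ne.symm, hfilt, hcnt, runsOf]

theorem runsOf_spec (t : List String) : t.Pairwise (· ≤ ·) →
    runsOf t = (PySem.List.dedup t).map (fun k => (k, (t.count k : Int))) := by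
  induction hn : t.length using Nat.strong_induction_on generalizing t with
  | _ n ih =>
    cases t with
    | nil => intro _; simp [runsOf, PySem.List.dedup]
    | cons v t =>
      intro hp
      have hle : ∀ w ∈ t, v ≤ w := fun w hw => (List.pairwise_cons.mp hp).1 w hw
      have hp' : t.Pairwise (· ≤ ·) := (List.pairwise_cons.mp hp).2
      have hfp : (t.filter (fun w => !(v == w))).Pairwise (· ≤ ·) := hp'.filter _
      have hn' : t.length + 1 = n := by simpa using hn
      have hflen : (t.filter (fun w => !(v == w))).length < n := by
        have := List.length_filter_le (fun w => !(v == w)) t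
        omega
      have hIH := ih _ hflen (t.filter (fun w => !(v == w))) rfl hfp
      rw [show runsOf (v :: t) = runsAux v 1 t from rfl,
        runsAux_spec t v 1 hle hp', hIH, dedup_cons]
      simp only [List.map_cons, List.count_cons_self, List.cons.injEq,
        Prod.mk.injEq]
      refine ⟨⟨trivial, by push_cast; ring⟩, ?_⟩
      apply List.map_congr_left
      intro k hk
      have hkf : k ∈ t.filter (fun w => !(v == w)) := (PySem.List.mem_dedup _ _).mp hk
      have hkv : ¬ (v = k) := by
        have := List.of_mem_filter hkf; simpa using this
      have hc : (t.filter (fun w => !(v == w))).count k = t.count k := by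
        rw [List.count_filter]
        simp [hkv]
      simp [hc, hkv]

-- dedup of a ≤-sorted list is strictly increasing
theorem dedup_pairwise_lt (t : List String) : t.Pairwise (· ≤ ·) →
    (PySem.List.dedup t).Pairwise (· < ·) := by
  induction hn : t.length using Nat.strong_induction_on generalizing t with
  | _ n ih =>
    cases t with
    | nil => intro _; simp [PySem.List.dedup]
    | cons v t =>
      intro hp
      have hle : ∀ w ∈ t, v ≤ w := fun w hw => (List.pairwise_cons.mp hp).1 w hw
      have hp' : t.Pairwise (· ≤ ·) := (List.pairwise_cons.mp hp).2
      have hfp : (t.filter (fun w => !(v == w))).Pairwise (· ≤ ·) := hp'.filter _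
      have hn' : t.length + 1 = n := by simpa using hn
      have hflen : (t.filter (fun w => !(v == w))).length < n := by
        have := List.length_filter_le (fun w => !(v == w)) t
        omega
      rw [dedup_cons]
      refine List.pairwise_cons.mpr ⟨?_, ih _ hflen _ rfl hfp⟩
      intro k hk
      have hkf : k ∈ t.filter (fun w => !(v == w)) := (PySem.List.mem_dedup _ _).mp hk
      have hkv : ¬ (v = k) := by have := List.of_mem_filter hkf; simpa using this
      exact lt_of_le_of_ne (hle k (List.mem_of_mem_filter hkf)) hkv

theorem histogram_for_non_numerical_series_spec : Claim_equal_histogram_for_non_numerical_series := by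
  unfold Claim_equal_histogram_for_non_numerical_series
  intro s _
  unfold Spec_histogram_for_non_numerical_series
  unfold histogram_for_non_numerical_series histogram_for_non_numerical_series_alt
  simp only []
  -- name the sorted series and its runs
  set t := PySem.List.sorted s (fun x => x) false with ht
  have htp : t.Pairwise (· ≤ ·) := PySem.List.sorted_pairwise s (fun x => x)
  have hruns : (t.foldl hfnStep []).reverse
      = (PySem.List.dedup t).map (fun k => (k, (t.count k : Int))) := by
    rw [foldl_hfnStep_nil, runsOf_spec t htp]
  -- A's counter dict
  have hc : s.foldl (fun d v => PySem.Dict.insert d v (PySem.Dict.getD d v 0 + 1)) PySem.Dict.empty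
      = PySem.Dict.counter s := PySem.Dict.foldl_insert_getD_add_one_eq_counter s
  -- A's labels are the sorted distinct elements, which equal dedup t
  have hperm : (PySem.List.dedup t).Perm (PySem.Set.ofList s) := by
    rw [List.perm_ext_iff_of_nodup (PySem.List.nodup_dedup t) (PySem.Set.nodup_ofList s)]
    intro k
    rw [PySem.List.mem_dedup, PySem.Set.mem_ofList, ht, PySem.List.mem_sorted]
  have hlab : PySem.List.sorted (PySem.Dict.keys (PySem.Dict.counter s)) (fun x => x) false
      = PySem.List.dedup t := by
    rw [PySem.Dict.keys_counter]
    exact PySem.List.sorted_eq_of_perm_of_pairwise_lt _ _ _ hperm (dedup_pairwise_lt t htp)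
  have hcnt : ∀ k, t.count k = s.count k := fun k => (PySem.List.sorted_perm s (fun x => x) false).count_eq k
  rw [hc, hlab, hruns]
  refine Prod.ext ?_ (Prod.ext ?_ ?_)
  · -- hist
    simp only [List.map_map]
    apply List.map_congr_left
    intro k _
    simp [PySem.Dict.getD_counter, hcnt k]
  · -- bins
    simp only [List.length_map, PySem.List.length_pyRange_one]
    have hL : (0 ≤ ((PySem.List.dedup t).length : Int)) := Int.natCast_nonneg _
    rw [show ((((PySem.List.dedup t).length : Int) - 0).toNat : Int) = ((PySem.List.dedup t).length : Int) by omega]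
    rw [← PySem.List.pyRange_one_succ_right hL]
  · -- labels
    simp [List.map_map, Function.comp_def]
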